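-- pv_equiv track=rewrite | github.com/SkyWalker2506/ccplugin-unity-craft | skills/unity-craft/scripts/scan_asset_library.py | parse_category_subcategory
-- ===== SOURCE A (Python) =====
-- CATEGORY_TAXONOMY = [
--     "3D Models",
--     "2D",
--     "Animation",
--     "Audio",
--     "Complete Projects",
--     "Editor Extensions",
--     "Essentials",
--     "GUI Skins",
--     "Particle Systems",
--     "Props",
--     "Scripting",
--     "Services",
--     "Shaders",
--     "Templates",
--     "Textures Materials",
--     "Tools",
--     "VFX",
--     "Add-Ons",
--     "Environments",
--     "Characters",
-- ]
--
-- def parse_category_subcategory(category_dir):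
--     """
--     Parse concatenated category string from directory name.
--     Longest taxonomy prefix wins; rest becomes subcategory.
--     Returns (category, subcategory) or (None, None) if no match.
--     """
--     category_dir_str = str(category_dir)
--
--     # Match longest prefix
--     matched_category = None
--     for prefix in sorted(CATEGORY_TAXONOMY, key=len, reverse=True):
--         if category_dir_str.startswith(prefix):
--             matched_category = prefix
--             break
--
--     if not matched_category:
--         return None, None
--
--     # Rest becomes subcategory
--     subcategory = category_dir_str[len(matched_category):]
--     if not subcategory:
--         subcategory = None
--
--     return matched_category, subcategory
-- ===== SOURCE B (Python) =====
-- CATEGORY_TAXONOMY = [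
--     "3D Models",
--     "2D",
--     "Animation",
--     "Audio",
--     "Complete Projects",
--     "Editor Extensions",
--     "Essentials",
--     "GUI Skins",
--     "Particle Systems",
--     "Props",
--     "Scripting",
--     "Services",
--     "Shaders",
--     "Templates",
--     "Textures Materials",
--     "Tools",
--     "VFX",
--     "Add-Ons",
--     "Environments",
--     "Characters",
-- ]
--
-- _TAXONOMY_SET = set(CATEGORY_TAXONOMY)
-- _MAX_LEN = max(map(len, CATEGORY_TAXONOMY), default=0)
--
--
-- def parse_category_subcategory(category_dir):
--     """Longest taxonomy prefix wins; rest becomes subcategory."""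
--     s = str(category_dir)
--     for L in range(min(len(s), _MAX_LEN), 0, -1):
--         p = s[:L]
--         if p in _TAXONOMY_SET:
--             return p, (s[L:] or None)
--     return None, None
-- ===== Notes on version B (the rewrite author's own statement) =====
-- stated objective: alternative
-- what changed: Instead of sorting the whole taxonomy by length on every call and scanning it with startswith, B walks the input's own prefixes from the longest possible one (capped at the longest taxonomy entry) downward and tests each against a precomputed set, returning on the first hit.
import Mathlib
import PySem

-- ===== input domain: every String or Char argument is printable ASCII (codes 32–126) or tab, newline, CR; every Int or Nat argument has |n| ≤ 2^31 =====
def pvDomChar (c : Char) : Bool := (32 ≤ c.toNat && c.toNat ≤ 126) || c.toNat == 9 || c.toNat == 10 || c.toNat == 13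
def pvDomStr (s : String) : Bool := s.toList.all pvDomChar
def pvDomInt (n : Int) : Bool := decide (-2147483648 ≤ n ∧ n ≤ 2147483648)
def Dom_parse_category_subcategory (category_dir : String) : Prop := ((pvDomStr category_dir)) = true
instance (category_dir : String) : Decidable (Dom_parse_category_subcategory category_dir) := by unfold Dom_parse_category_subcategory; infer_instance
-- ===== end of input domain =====

-- B replaces A's sort-the-taxonomy-then-scan by a scan over the input's own prefixes
-- (longest first, capped at the longest taxonomy entry) against a set; alternative, not claimed faster.

-- ===== PORT A =====
def CATEGORY_TAXONOMY : List String :=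
  ["3D Models", "2D", "Animation", "Audio", "Complete Projects", "Editor Extensions",
   "Essentials", "GUI Skins", "Particle Systems", "Props", "Scripting", "Services",
   "Shaders", "Templates", "Textures Materials", "Tools", "VFX", "Add-Ons",
   "Environments", "Characters"]

-- the 'for prefix in …: if startswith: matched = prefix; break' loop
def pvAScan (s : String) : List String → Option String
  | [] => none
  | p :: ps => if PySem.Str.startswith s p then some p else pvAScan s ps

def parse_category_subcategory (category_dir : String) : Option String × Option String :=
  let category_dir_str := category_dir   -- str(category_dir)
  match pvAScan category_dir_str
      (PySem.List.sorted CATEGORY_TAXONOMY (fun p => PySem.Str.len p) true) with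
  | none => (none, none)
  | some m =>
    if m = "" then (none, none)   -- Python's 'if not matched_category'
    else
      let subcategory := PySem.Str.slice category_dir_str (some (PySem.Str.len m)) none
      (some m, if subcategory = "" then none else some subcategory)

-- ===== PORT B =====
def TAXONOMY_SET : PySem.Set String := PySem.Set.ofList CATEGORY_TAXONOMY

def MAX_LEN : Int := PySem.List.maxD (CATEGORY_TAXONOMY.map PySem.Str.len) (fun n => n) 0

-- 'for L in range(min(len(s), _MAX_LEN), 0, -1)': fuel n is the current L
def pvBLoop (s : String) : Nat → Option String × Option String
  | 0 => (none, none)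
  | n + 1 =>
      let p := PySem.Str.slice s none (some ((n : Int) + 1))
      if PySem.Set.contains TAXONOMY_SET p then
        let rest := PySem.Str.slice s (some ((n : Int) + 1)) none
        (some p, if rest = "" then none else some rest)
      else pvBLoop s n

def parse_category_subcategory_alt (category_dir : String) : Option String × Option String :=
  pvBLoop category_dir (min (PySem.Str.len category_dir) MAX_LEN).toNat

-- ===== PRECONDITION & SPEC =====
def Spec_parse_category_subcategory (category_dir : String) (out : Option String × Option String) : Prop := out = parse_category_subcategory_alt category_dir
instance (category_dir : String) (out : Option String × Option String) : Decidable (Spec_parse_category_subcategory category_dir out) := by unfold Spec_parse_category_subcategory; infer_instance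

-- ===== CLAIM (what is proved, stated in full; the proofs are below) =====
def Claim_equal_parse_category_subcategory : Prop := ∀ (category_dir : String), Dom_parse_category_subcategory category_dir → Spec_parse_category_subcategory category_dir (parse_category_subcategory category_dir)

-- ===== LEMMAS AND PROOFS =====

-- A's sorted taxonomy, evaluated (stable sort by length, descending)
def pvSortedTax : List String :=
  ["Textures Materials", "Complete Projects", "Editor Extensions", "Particle Systems",
   "Environments", "Essentials", "Characters", "3D Models", "Animation", "GUI Skins",
   "Scripting", "Templates", "Services", "Shaders", "Add-Ons", "Audio", "Props",
   "Tools", "VFX", "2D"]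

lemma pvSortedTax_eval :
    PySem.List.sorted CATEGORY_TAXONOMY (fun p => PySem.Str.len p) true = pvSortedTax := by
  decide

-- the predicate both loops are secretly searching with: taxonomy word, prefix of cs, length ≤ n
def pvP (cs : List Char) (n : Nat) (t : String) : Bool :=
  decide (t.toList <+: cs ∧ t.toList.length ≤ n)

-- shared output shape: the matched word and the remainder of s
def pvOut (s : String) (r : Option String) : Option String × Option String :=
  match r with
  | none => (none, none)
  | some t =>
      let rest := PySem.Str.slice s (some (t.toList.length : Int)) none
      (some t, if rest = "" then none else some rest)

lemma pvTax_len_facts : ∀ t ∈ pvSortedTax, 1 ≤ t.toList.length ∧ t.toList.length ≤ 18 := by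
  decide

lemma pvTax_pairwise : pvSortedTax.Pairwise (fun a b => b.toList.length ≤ a.toList.length) := by
  decide

lemma pvMem_sortedTax (a : String) : a ∈ pvSortedTax ↔ a ∈ CATEGORY_TAXONOMY := by
  have h := PySem.List.sorted_perm CATEGORY_TAXONOMY (fun p => PySem.Str.len p) true
  rw [pvSortedTax_eval] at h
  exact h.mem_iff

lemma pvPrefix_uniq {cs : List Char} {t1 t2 : String}
    (h1 : t1.toList <+: cs) (h2 : t2.toList <+: cs)
    (hl : t1.toList.length = t2.toList.length) : t1 = t2 := by
  apply String.toList_inj.mp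
  rcases Nat.le_total t1.toList.length t2.toList.length with h | h
  · exact (List.prefix_of_prefix_length_le h1 h2 h).eq_of_length hl
  · exact ((List.prefix_of_prefix_length_le h2 h1 h).eq_of_length hl.symm).symm

lemma pvAScan_eq_find (s : String) (l : List String) :
    pvAScan s l = l.find? (fun p => PySem.Str.startswith s p) := by
  induction l with
  | nil => rfl
  | cons p ps ih =>
    by_cases h : PySem.Str.startswith s p = true
    · rw [pvAScan, if_pos h, List.find?_cons_of_pos h]
    · rw [pvAScan, if_neg h, List.find?_cons_of_neg (by simpa using h), ih]

lemma pvFind?_congr_mem {α : Type} (l : List α) (p q : α → Bool)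
    (h : ∀ a ∈ l, p a = q a) : l.find? p = l.find? q := by
  induction l with
  | nil => rfl
  | cons a tl ih =>
    have ha := h a (by simp)
    by_cases hp : p a = true
    · rw [List.find?_cons_of_pos hp, List.find?_cons_of_pos (ha ▸ hp)]
    · rw [List.find?_cons_of_neg (by simpa using hp),
        List.find?_cons_of_neg (by rw [← ha]; simpa using hp),
        ih fun b hb => h b (by simp [hb])]

lemma pvFind?_first (l : List String) (p : String → Bool) (t : String)
    (hpw : l.Pairwise (fun a b => b.toList.length ≤ a.toList.length))
    (ht : t ∈ l) (hpt : p t = true)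
    (hmax : ∀ a ∈ l, p a = true → a.toList.length ≤ t.toList.length)
    (huq : ∀ a ∈ l, p a = true → a.toList.length = t.toList.length → a = t) :
    l.find? p = some t := by
  induction l with
  | nil => simp at ht
  | cons a tl ih =>
    rw [List.pairwise_cons] at hpw
    by_cases hp : p a = true
    · have hle : a.toList.length ≤ t.toList.length := hmax a (by simp) hp
      have hge : t.toList.length ≤ a.toList.length := by
        rcases List.mem_cons.mp ht with rfl | htl
        · exact le_refl _
        · exact hpw.1 t htl
      have hat : a = t := huq a (by simp) hp (le_antisymm hle hge)
      rw [List.find?_cons_of_pos hp, hat]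
    · have htl : t ∈ tl := by
        rcases List.mem_cons.mp ht with rfl | htl
        · exact absurd hpt hp
        · exact htl
      rw [List.find?_cons_of_neg (by simpa using hp)]
      exact ih hpw.2 htl (fun b hb => hmax b (by simp [hb]))
        (fun b hb => huq b (by simp [hb]))

lemma pvContains_iff (x : String) :
    PySem.Set.contains TAXONOMY_SET x = true ↔ x ∈ CATEGORY_TAXONOMY := by
  have hset : TAXONOMY_SET = CATEGORY_TAXONOMY := by decide
  rw [hset]
  simp [PySem.Set.contains]

lemma pvBLoop_eq (s : String) (n : Nat) (hn : n ≤ s.toList.length) :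
    pvBLoop s n = pvOut s (pvSortedTax.find? (pvP s.toList n)) := by
  induction n with
  | zero =>
    rw [List.find?_eq_none.mpr ?_]
    · rfl
    · intro a ha
      have h1 := (pvTax_len_facts a ha).1
      simp only [pvP, decide_eq_true_eq, not_and]
      intro _
      omega
  | succ n ih =>
    have hn' : n ≤ s.toList.length := Nat.le_of_succ_le hn
    have hcast : ((n : Int) + 1) = ((n + 1 : Nat) : Int) := by push_cast; ring
    have htl : (PySem.Str.slice s none (some ((n : Int) + 1))).toList = s.toList.take (n + 1) := by
      rw [hcast]
      simp only [PySem.Str.toList_slice, PySem.Chars.slice_eq_listSlice,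
        PySem.List.slice_to_natCast]
    have hpre : (PySem.Str.slice s none (some ((n : Int) + 1))).toList <+: s.toList := by
      rw [htl]; exact List.take_prefix _ _
    have hlenp : (PySem.Str.slice s none (some ((n : Int) + 1))).toList.length = n + 1 := by
      rw [htl, List.length_take]; omega
    by_cases hmem : PySem.Str.slice s none (some ((n : Int) + 1)) ∈ CATEGORY_TAXONOMY
    · have hfind : pvSortedTax.find? (pvP s.toList (n + 1)) =
          some (PySem.Str.slice s none (some ((n : Int) + 1))) := by
        apply pvFind?_first _ _ _ pvTax_pairwise ((pvMem_sortedTax _).mpr hmem)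
        · simp only [pvP, decide_eq_true_eq]
          exact ⟨hpre, by omega⟩
        · intro a _ hpa
          simp only [pvP, decide_eq_true_eq] at hpa
          omega
        · intro a _ hpa hlen
          simp only [pvP, decide_eq_true_eq] at hpa
          exact pvPrefix_uniq hpa.1 hpre hlen
      simp only [pvBLoop]
      rw [if_pos ((pvContains_iff _).mpr hmem), hfind]
      rw [hcast] at hlenp ⊢
      simp only [pvOut, hlenp]
    · have hcongr : pvSortedTax.find? (pvP s.toList (n + 1)) =
          pvSortedTax.find? (pvP s.toList n) := by
        apply pvFind?_congr_mem
        intro a ha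
        simp only [pvP, decide_eq_decide]
        constructor
        · rintro ⟨hp, hle⟩
          refine ⟨hp, ?_⟩
          by_contra hgt
          have hla : a.toList.length = n + 1 := by omega
          have : a.toList = s.toList.take (n + 1) := by
            rw [← hla]; exact List.prefix_iff_eq_take.mp hp
          have : a = PySem.Str.slice s none (some ((n : Int) + 1)) :=
            String.toList_inj.mp (by rw [this, htl])
          exact hmem (this ▸ (pvMem_sortedTax a).mp ha)
        · rintro ⟨hp, hle⟩
          exact ⟨hp, by omega⟩
      simp only [pvBLoop]
      rw [if_neg (fun h => hmem ((pvContains_iff _).mp h)), hcongr, ih hn']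

lemma pvA_eq (s : String) :
    parse_category_subcategory s = pvOut s (pvSortedTax.find? (pvP s.toList s.toList.length)) := by
  simp only [parse_category_subcategory, pvSortedTax_eval, pvAScan_eq_find]
  have hcongr : pvSortedTax.find? (fun p => PySem.Str.startswith s p) =
      pvSortedTax.find? (pvP s.toList s.toList.length) := by
    apply pvFind?_congr_mem
    intro a _
    simp only [pvP, PySem.Str.startswith_eq]
    rw [Bool.eq_iff_iff]
    simp only [PySem.Chars.startswith_iff, decide_eq_true_eq]
    exact ⟨fun h => ⟨h, h.length_le⟩, fun h => h.1⟩
  rw [hcongr]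
  cases hf : pvSortedTax.find? (pvP s.toList s.toList.length) with
  | none => rfl
  | some m =>
    have hmem : m ∈ pvSortedTax := List.mem_of_find?_eq_some hf
    have hne : m ≠ "" := by
      intro h
      subst h
      have : ¬ ("" ∈ pvSortedTax) := by decide
      exact this hmem
    simp only [pvOut]
    rw [if_neg hne]
    have hlen : PySem.Str.len m = (m.toList.length : Int) := by simp
    rw [hlen]

lemma pvB_eq (s : String) :
    parse_category_subcategory_alt s = pvOut s (pvSortedTax.find? (pvP s.toList s.toList.length)) := by
  unfold parse_category_subcategory_alt
  have hm : MAX_LEN = 18 := by decide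
  have hlen : PySem.Str.len s = (s.toList.length : Int) := by simp
  have hfuel : (min (PySem.Str.len s) MAX_LEN).toNat = min s.toList.length 18 := by
    rw [hm, hlen]
    omega
  rw [hfuel, pvBLoop_eq s _ (Nat.min_le_left _ _)]
  congr 1
  apply pvFind?_congr_mem
  intro a ha
  simp only [pvP, decide_eq_decide]
  have h18 := (pvTax_len_facts a ha).2
  constructor
  · rintro ⟨hp, _⟩
    exact ⟨hp, hp.length_le⟩
  · rintro ⟨hp, _⟩
    refine ⟨hp, ?_⟩
    have := hp.length_le
    omega

-- ===== VERDICT (by name: the statement is the Claim_ definition above) =====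
theorem parse_category_subcategory_spec : Claim_equal_parse_category_subcategory := by
  intro s _
  unfold Spec_parse_category_subcategory
  rw [pvA_eq, pvB_eq]
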